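-- pv_equiv track=rewrite | github.com/cms02snu/Algorithm | baekjoon/2240.py | solution
-- ===== SOURCE A (Python) =====
-- def solution(t,w,data):
--     table = [[0]*(w+1) for _ in range(t)]
--
--     for i in range(t):
--         for j in range(w+1):
--             if j>i+1:
--                 continue
--             if i==0:
--                 if j==0:
--                     if data[0]==0:
--                         table[0][0] = 1
--                         table[0][1] = 0
--                     else:
--                         table[0][0] = 0
--                         table[0][1] = 1
--
--             else:
--                 if j==0:
--                     if data[i]==j%2:
--                         table[i][0] = table[i-1][0]+1
--                     else:
--                         table[i][0] = table[i-1][0]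
--                 else:
--                     if data[i]==j%2:
--                         table[i][j] = max(table[i-1][j-1],table[i-1][j])+1
--                     else:
--                         table[i][j] = max(table[i-1][j-1],table[i-1][j])
--
--     return max(table[t-1])
-- ===== SOURCE B (Python) =====
-- def solution(t, w, data):
--     # Top-down memoized recursion over the same recurrence (memo dict instead of a table).
--     memo = {}
--
--     def f(i, j):
--         if (i, j) in memo:
--             return memo[(i, j)]
--         if j > i + 1:
--             v = 0
--         elif i == 0:
--             if j == 0:
--                 v = 1 if data[0] == 0 else 0
--             else:
--                 v = 0 if data[0] == 0 else 1
--         elif j == 0: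
--             v = f(i - 1, 0) + (1 if data[i] == 0 else 0)
--         else:
--             v = max(f(i - 1, j - 1), f(i - 1, j)) + (1 if data[i] == j % 2 else 0)
--         memo[(i, j)] = v
--         return v
--
--     return max(f(t - 1, j) for j in range(w + 1))
-- ===== Notes on version B (the rewrite author's own statement) =====
-- stated objective: alternative
-- what changed: A fills a t x (w+1) DP table in place with nested index loops and takes the max of the last row; B computes the same recurrence as a top-down memoized recursion f(i,j) with a dict cache and maxes f(t-1,j) over j.
import Mathlib
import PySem

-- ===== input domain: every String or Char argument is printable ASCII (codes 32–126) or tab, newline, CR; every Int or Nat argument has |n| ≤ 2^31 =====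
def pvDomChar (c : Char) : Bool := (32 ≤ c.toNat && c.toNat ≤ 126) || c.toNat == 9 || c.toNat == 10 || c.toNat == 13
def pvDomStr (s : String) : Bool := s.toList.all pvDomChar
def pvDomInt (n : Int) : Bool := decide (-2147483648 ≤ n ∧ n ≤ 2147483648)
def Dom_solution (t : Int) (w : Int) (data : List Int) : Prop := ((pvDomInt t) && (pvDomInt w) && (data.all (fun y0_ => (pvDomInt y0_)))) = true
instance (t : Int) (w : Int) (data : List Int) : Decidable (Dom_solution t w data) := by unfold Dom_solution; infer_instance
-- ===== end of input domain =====

-- B re-implements the same recurrence as a top-down recursion with a memo dict instead of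
-- A's forward-filled 2D table (objective: alternative decomposition, same asymptotic cost).

-- ===== PORT A =====
-- data[i] (index nonnegative wherever A returns; default 0 never read inside Pre_)
def dgetA (data : List Int) (i : Int) : Int := (PySem.List.pyGet? data i).getD 0
-- table[i][j] read / write with Nat indices (all loop indices are nonnegative)
def tgetA (tbl : List (List Int)) (i j : Nat) : Int := (tbl.getD i []).getD j 0
def tsetA (tbl : List (List Int)) (i j : Nat) (v : Int) : List (List Int) :=
  tbl.set i ((tbl.getD i []).set j v)

-- the body of the double loop, step for step
def stepA (data : List Int) (tbl : List (List Int)) (i j : Int) : List (List Int) :=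
  if j > i + 1 then tbl                              -- continue
  else if i = 0 then
    (if j = 0 then
      (if dgetA data 0 = 0 then tsetA (tsetA tbl 0 0 1) 0 1 0
       else tsetA (tsetA tbl 0 0 0) 0 1 1)
     else tbl)
  else
    (if j = 0 then
      (if dgetA data i = PySem.Int.mod j 2 then tsetA tbl i.toNat 0 (tgetA tbl (i.toNat - 1) 0 + 1)
       else tsetA tbl i.toNat 0 (tgetA tbl (i.toNat - 1) 0))
     else
      (if dgetA data i = PySem.Int.mod j 2 then
         tsetA tbl i.toNat j.toNat (max (tgetA tbl (i.toNat - 1) (j.toNat - 1)) (tgetA tbl (i.toNat - 1) j.toNat) + 1)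
       else
         tsetA tbl i.toNat j.toNat (max (tgetA tbl (i.toNat - 1) (j.toNat - 1)) (tgetA tbl (i.toNat - 1) j.toNat))))

def solution (t : Int) (w : Int) (data : List Int) : Int :=
  let table0 := List.replicate t.toNat (List.replicate (w + 1).toNat 0)
  let table :=
    (PySem.List.pyRange 0 t 1).foldl
      (fun tbl i => (PySem.List.pyRange 0 (w + 1) 1).foldl (fun tbl j => stepA data tbl i j) tbl)
      table0
  -- max(table[t-1]); the .getD defaults correspond to A raising (excluded by Pre_)
  (PySem.List.max? ((PySem.List.pyGet? table (t - 1)).getD []) (fun x => x)).getD 0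

-- ===== PORT B =====
-- Source B's f(i,j); the memo dict is a pure cache, so the recursion computes the same values
def fB (data : List Int) : Nat → Int → Int
  | 0, j =>
    if j > 1 then 0
    else if j = 0 then (if dgetA data 0 = 0 then 1 else 0)
    else (if dgetA data 0 = 0 then 0 else 1)
  | (i + 1), j =>
    if j > (i : Int) + 2 then 0
    else if j = 0 then fB data i 0 + (if dgetA data ((i : Int) + 1) = 0 then 1 else 0)
    else max (fB data i (j - 1)) (fB data i j) +
           (if dgetA data ((i : Int) + 1) = PySem.Int.mod j 2 then 1 else 0)

def solution_alt (t : Int) (w : Int) (data : List Int) : Int :=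
  -- max(f(t-1, j) for j in range(w+1)); (t-1).toNat = t-1 wherever A returns (t ≥ 1 in Pre_)
  (PySem.List.max?
      ((PySem.List.pyRange 0 (w + 1) 1).map (fun j => fB data (t - 1).toNat j))
      (fun x => x)).getD 0

-- ===== PRECONDITION & SPEC =====
-- Exactly the inputs on which A returns: t = 0 raises IndexError on max(table[-1]) of the empty
-- table (t < 0 similarly), w = 0 raises IndexError on table[0][1] (w < 0 on table[0][0]), and
-- data shorter than t raises IndexError on data[i].
def Pre_solution (t : Int) (w : Int) (data : List Int) : Prop :=
  1 ≤ t ∧ 1 ≤ w ∧ t ≤ (data.length : Int)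
instance (t : Int) (w : Int) (data : List Int) : Decidable (Pre_solution t w data) := by
  unfold Pre_solution; infer_instance

def pvWitness_solution : Int × Int × List Int := (3, 2, [0, 1, 1])

def Spec_solution (t : Int) (w : Int) (data : List Int) (out : Int) : Prop := out = solution_alt t w data
instance (t : Int) (w : Int) (data : List Int) (out : Int) : Decidable (Spec_solution t w data out) := by unfold Spec_solution; infer_instance

-- ===== CLAIM (what is proved, stated in full; the proofs are below) =====
def Claim_equal_solution : Prop := ∀ (t : Int) (w : Int) (data : List Int), Dom_solution t w data → Pre_solution t w data → Spec_solution t w data (solution t w data)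

-- ===== LEMMAS AND PROOFS =====

-- expected row i of the table: entry j is fB data i j (K = w+1 entries)
def expRow (data : List Int) (K i : Nat) : List Int :=
  (List.range K).map (fun (j : Nat) => fB data i (j : Int))

-- table after the first `filled` rows have been processed: rows < filled hold fB, the rest zeros
def expTbl (data : List Int) (K n filled : Nat) : List (List Int) :=
  (List.range n).map (fun k => if k < filled then expRow data K k else List.replicate K 0)

-- table midway through the inner loop on row i+1: columns < m of that row already written
def partTbl (data : List Int) (K n i m : Nat) : List (List Int) :=
  (List.range n).map (fun k =>
    if k < i + 1 then expRow data K k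
    else if k = i + 1 then (List.range K).map (fun j => if j < m then fB data (i + 1) (j : Int) else 0)
    else List.replicate K 0)

theorem expTbl_length (data : List Int) (K n filled : Nat) : (expTbl data K n filled).length = n := by
  simp [expTbl]

theorem partTbl_length (data : List Int) (K n i m : Nat) : (partTbl data K n i m).length = n := by
  simp [partTbl]

theorem expTbl_getElem (data : List Int) (K n filled k : Nat)
    (h : k < (expTbl data K n filled).length) :
    (expTbl data K n filled)[k] =
      if k < filled then expRow data K k else List.replicate K 0 := by
  unfold expTbl
  rw [List.getElem_map, List.getElem_range]

theorem partTbl_getElem (data : List Int) (K n i m k : Nat)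
    (h : k < (partTbl data K n i m).length) :
    (partTbl data K n i m)[k] =
      (if k < i + 1 then expRow data K k
       else if k = i + 1 then (List.range K).map (fun j => if j < m then fB data (i + 1) (j : Int) else 0)
       else List.replicate K 0) := by
  unfold partTbl
  rw [List.getElem_map, List.getElem_range]

theorem expTbl_zero (data : List Int) (K n : Nat) :
    expTbl data K n 0 = List.replicate n (List.replicate K 0) := by
  unfold expTbl
  simp [List.map_const']

theorem partTbl_zero (data : List Int) (K n i : Nat) :
    partTbl data K n i 0 = expTbl data K n (i + 1) := by
  unfold partTbl expTbl
  apply List.map_congr_left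
  intro k hk
  by_cases h1 : k < i + 1
  · simp [h1]
  · rw [if_neg h1, if_neg h1]
    by_cases h2 : k = i + 1
    · rw [if_pos h2]
      simp [List.map_const']
    · rw [if_neg h2]

theorem partTbl_full (data : List Int) (K n i : Nat) :
    partTbl data K n i K = expTbl data K n (i + 2) := by
  unfold partTbl expTbl
  apply List.map_congr_left
  intro k hk
  by_cases h1 : k < i + 1
  · rw [if_pos h1, if_pos (by omega : k < i + 2)]
  · rw [if_neg h1]
    by_cases h2 : k = i + 1
    · rw [if_pos h2, if_pos (by omega : k < i + 2), h2]
      unfold expRow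
      apply List.map_congr_left
      intro j hj
      rw [if_pos (List.mem_range.mp hj)]
    · rw [if_neg h2, if_neg (by omega : ¬ k < i + 2)]

theorem tgetA_partTbl (data : List Int) (K n i m k j : Nat) (hk : k < n) (hkle : k < i + 1)
    (hj : j < K) : tgetA (partTbl data K n i m) k j = fB data k (j : Int) := by
  unfold tgetA
  have hrow : (partTbl data K n i m).getD k [] = expRow data K k := by
    rw [List.getD_eq_getElem?_getD,
      List.getElem?_eq_getElem (by rw [partTbl_length]; exact hk),
      partTbl_getElem data K n i m k (by rw [partTbl_length]; exact hk), if_pos hkle]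
    rfl
  rw [hrow]
  unfold expRow
  rw [PySem.List.getD_map_range _ K j _ hj]

theorem row_partTbl_self (data : List Int) (K n i m : Nat) (hi : i + 1 < n) :
    (partTbl data K n i m).getD (i + 1) [] =
      (List.range K).map (fun j => if j < m then fB data (i + 1) (j : Int) else 0) := by
  unfold partTbl
  rw [PySem.List.getD_map_range _ n _ _ hi]
  simp

theorem partTbl_set (data : List Int) (K n i m : Nat) (hm : m < K) (hi : i + 1 < n) (v : Int)
    (hv : v = fB data (i + 1) (m : Int)) :
    tsetA (partTbl data K n i m) (i + 1) m v = partTbl data K n i (m + 1) := by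
  unfold tsetA
  rw [row_partTbl_self data K n i m hi]
  apply List.ext_getElem
  · simp [partTbl]
  intro k hk1 hk2
  have hkn : k < n := by rw [partTbl_length] at hk2; exact hk2
  rw [List.getElem_set, partTbl_getElem data K n i (m + 1) k (by rw [partTbl_length]; exact hkn)]
  by_cases hik : i + 1 = k
  · rw [if_pos hik, ← hik]
    rw [if_neg (by omega : ¬ i + 1 < i + 1), if_pos rfl]
    apply List.ext_getElem
    · simp
    intro j hj1 hj2
    rw [List.getElem_set]
    simp only [List.getElem_map, List.getElem_range]
    by_cases hjm : m = j
    · rw [if_pos hjm, if_pos (by omega : j < m + 1), ← hjm, hv]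
    · rw [if_neg hjm]
      by_cases hj2m : j < m
      · rw [if_pos hj2m, if_pos (by omega : j < m + 1)]
      · rw [if_neg hj2m, if_neg (by omega : ¬ j < m + 1)]
  · rw [if_neg hik, partTbl_getElem data K n i m k (by rw [partTbl_length]; exact hkn)]
    by_cases hklt : k < i + 1
    · rw [if_pos hklt, if_pos hklt]
    · rw [if_neg hklt, if_neg hklt, if_neg (fun h => hik h.symm), if_neg (fun h => hik h.symm)]

theorem partTbl_skip (data : List Int) (K n i m : Nat) (h0 : fB data (i + 1) (m : Int) = 0) :
    partTbl data K n i (m + 1) = partTbl data K n i m := by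
  unfold partTbl
  apply List.map_congr_left
  intro k hk
  by_cases h1 : k < i + 1
  · rw [if_pos h1, if_pos h1]
  · rw [if_neg h1, if_neg h1]
    by_cases h2 : k = i + 1
    · rw [if_pos h2, if_pos h2]
      apply List.map_congr_left
      intro j hj
      by_cases hjm : j = m
      · rw [if_pos (by omega : j < m + 1), if_neg (by omega : ¬ j < m), hjm, h0]
      · by_cases hj2 : j < m
        · rw [if_pos (by omega : j < m + 1), if_pos hj2]
        · rw [if_neg (by omega : ¬ j < m + 1), if_neg hj2]
    · rw [if_neg h2, if_neg h2]

theorem stepA_inner (data : List Int) (K n i m : Nat) (hm : m < K) (hi : i + 1 < n) :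
    stepA data (partTbl data K n i m) ((i : Int) + 1) (m : Int) = partTbl data K n i (m + 1) := by
  unfold stepA
  by_cases hskip : (m : Int) > (i : Int) + 1 + 1
  · rw [if_pos hskip]
    have h0 : fB data (i + 1) (m : Int) = 0 := by
      rw [fB, if_pos (by omega : (m : Int) > (i : Int) + 2)]
    exact (partTbl_skip data K n i m h0).symm
  · rw [if_neg hskip, if_neg (by omega : ¬ (i : Int) + 1 = 0)]
    have hiton : ((i : Int) + 1).toNat = i + 1 := by omega
    by_cases hm0 : (m : Int) = 0
    · have hm0' : m = 0 := by omega
      rw [if_pos hm0, hiton]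
      subst hm0'
      have hmod : PySem.Int.mod ((0 : Nat) : Int) 2 = 0 := by decide
      rw [hmod]
      have hread : tgetA (partTbl data K n i 0) (i + 1 - 1) 0 = fB data i 0 := by
        have := tgetA_partTbl data K n i 0 i 0 (by omega) (by omega) (by omega)
        simpa using this
      split_ifs with hd
      · rw [hread]
        apply partTbl_set data K n i 0 hm hi
        rw [fB, if_neg (by omega : ¬ ((0 : Nat) : Int) > (i : Int) + 2),
          if_pos (by norm_num : ((0 : Nat) : Int) = 0), if_pos hd]
      · rw [hread]
        apply partTbl_set data K n i 0 hm hi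
        rw [fB, if_neg (by omega : ¬ ((0 : Nat) : Int) > (i : Int) + 2),
          if_pos (by norm_num : ((0 : Nat) : Int) = 0), if_neg hd]
        ring
    · rw [if_neg hm0, hiton]
      have hm1 : 1 ≤ m := by omega
      have hmton : (m : Int).toNat = m := by omega
      rw [hmton]
      have hr1 : tgetA (partTbl data K n i m) (i + 1 - 1) (m - 1) = fB data i ((m : Int) - 1) := by
        have := tgetA_partTbl data K n i m i (m - 1) (by omega) (by omega) (by omega)
        have hc : (((m - 1 : Nat)) : Int) = (m : Int) - 1 := by omega
        simpa [hc] using this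
      have hr2 : tgetA (partTbl data K n i m) (i + 1 - 1) m = fB data i (m : Int) := by
        have := tgetA_partTbl data K n i m i m (by omega) (by omega) hm
        simpa using this
      have hfb : fB data (i + 1) (m : Int) =
          max (fB data i ((m : Int) - 1)) (fB data i (m : Int)) +
            (if dgetA data ((i : Int) + 1) = PySem.Int.mod (m : Int) 2 then 1 else 0) := by
        rw [fB, if_neg (by omega : ¬ (m : Int) > (i : Int) + 2), if_neg hm0]
      split_ifs with hd
      · rw [hr1, hr2]
        apply partTbl_set data K n i m hm hi
        rw [hfb, if_pos hd]
      · rw [hr1, hr2]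
        apply partTbl_set data K n i m hm hi
        rw [hfb, if_neg hd]
        ring

theorem inner_loop (data : List Int) (K n i : Nat) (hi : i + 1 < n) (m : Nat) (hm : m ≤ K) :
    ((List.range m).map (fun (j : Nat) => (j : Int))).foldl
        (fun tbl j => stepA data tbl ((i : Int) + 1) j) (expTbl data K n (i + 1))
      = partTbl data K n i m := by
  induction m with
  | zero => rw [partTbl_zero]; rfl
  | succ m ih =>
    rw [List.range_succ, List.map_append, List.foldl_append, ih (by omega)]
    exact stepA_inner data K n i m (by omega) hi

theorem stepA_i0_id (data : List Int) (tbl : List (List Int)) (j : Int) (hj : 1 ≤ j) :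
    stepA data tbl 0 j = tbl := by
  unfold stepA
  split_ifs with h1 h2 h3 <;> first | rfl | omega

theorem stepA_row0 (data : List Int) (K n : Nat) (hK : 2 ≤ K) (hn : 1 ≤ n) :
    stepA data (expTbl data K n 0) 0 0 = expTbl data K n 1 := by
  unfold stepA
  rw [if_neg (by omega : ¬ (0 : Int) > 0 + 1), if_pos rfl, if_pos rfl]
  have hrow0 : (expTbl data K n 0).getD 0 [] = List.replicate K 0 := by
    unfold expTbl
    rw [PySem.List.getD_map_range _ n 0 _ hn]
    simp
  have key : ∀ a b : Int,
      (a = (if dgetA data 0 = 0 then (1:Int) else 0)) →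
      (b = (if dgetA data 0 = 0 then (0:Int) else 1)) →
      tsetA (tsetA (expTbl data K n 0) 0 0 a) 0 1 b = expTbl data K n 1 := by
    intro a b ha hb
    unfold tsetA
    rw [hrow0]
    rw [List.getD_eq_getElem?_getD, List.getElem?_set_self (by rw [expTbl_length]; omega)]
    simp only [Option.getD_some]
    rw [List.set_set]
    apply List.ext_getElem
    · simp [expTbl]
    intro k hk1 hk2
    have hkn : k < n := by rw [expTbl_length] at hk2; exact hk2
    rw [List.getElem_set, expTbl_getElem data K n 1 k (by rw [expTbl_length]; exact hkn)]
    by_cases hk0 : 0 = k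
    · subst hk0
      rw [if_pos rfl, if_pos (by omega : (0:Nat) < 1)]
      unfold expRow
      apply List.ext_getElem
      · simp
      intro j hj1 hj2
      simp only [List.getElem_map, List.getElem_range]
      rw [List.getElem_set, List.getElem_set]
      by_cases hj1' : j = 1
      · rw [if_pos (by omega : 1 = j)]
        rw [fB, if_neg (by omega : ¬ ((j : Nat) : Int) > 1), if_neg (by omega : ¬ ((j : Nat) : Int) = 0), hb]
      · rw [if_neg (by omega : ¬ 1 = j)]
        by_cases hj0 : j = 0
        · rw [if_pos (by omega : 0 = j)]
          rw [fB, if_neg (by omega : ¬ ((j : Nat) : Int) > 1), if_pos (by omega : ((j : Nat) : Int) = 0), ha]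
        · rw [if_neg (by omega : ¬ 0 = j), List.getElem_replicate]
          rw [fB, if_pos (by omega : ((j : Nat) : Int) > 1)]
    · rw [if_neg hk0, expTbl_getElem data K n 0 k (by rw [expTbl_length]; exact hkn)]
      rw [if_neg (by omega : ¬ k < 0), if_neg (by omega : ¬ k < 1)]
  split_ifs with hd
  · exact key 1 0 (by rw [if_pos hd]) (by rw [if_pos hd])
  · exact key 0 1 (by rw [if_neg hd]) (by rw [if_neg hd])

theorem row_zero (data : List Int) (K n : Nat) (hK : 2 ≤ K) (hn : 1 ≤ n) (m : Nat) (hm : m ≤ K) :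
    ((List.range m).map (fun (j : Nat) => (j : Int))).foldl
        (fun tbl j => stepA data tbl 0 j) (expTbl data K n 0)
      = (if m = 0 then expTbl data K n 0 else expTbl data K n 1) := by
  induction m with
  | zero => rfl
  | succ m ih =>
    rw [List.range_succ, List.map_append, List.foldl_append, ih (by omega)]
    by_cases hm0 : m = 0
    · subst hm0
      simp only [if_neg (by omega : ¬ (0:Nat) + 1 = 0)]
      simpa using stepA_row0 data K n hK hn
    · rw [if_neg hm0, if_neg (by omega : ¬ m + 1 = 0)]
      simpa using stepA_i0_id data (expTbl data K n 1) (m : Int) (by omega)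

theorem outer_loop (data : List Int) (K n : Nat) (hK : 2 ≤ K) (m : Nat) (hm : 1 ≤ m) (hmn : m ≤ n) :
    ((List.range m).map (fun (i : Nat) => (i : Int))).foldl
        (fun tbl i => ((List.range K).map (fun (j : Nat) => (j : Int))).foldl
            (fun tbl j => stepA data tbl i j) tbl)
        (expTbl data K n 0)
      = expTbl data K n m := by
  induction m with
  | zero => omega
  | succ m ih =>
    rw [List.range_succ, List.map_append, List.foldl_append]
    by_cases hm0 : m = 0
    · subst hm0
      simp only [List.range_zero, List.map_nil, List.foldl_nil]
      have := row_zero data K n hK (by omega) K (le_refl K)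
      simp only [List.map_cons, List.map_nil, List.foldl_cons, List.foldl_nil]
      rw [if_neg (by omega : ¬ K = 0)] at this
      simpa using this
    · rw [ih (by omega) (by omega)]
      simp only [List.foldl_cons, List.foldl_nil, List.map_cons, List.map_nil]
      obtain ⟨i, rfl⟩ : ∃ i, m = i + 1 := ⟨m - 1, by omega⟩
      have hcast : (((i + 1 : Nat)) : Int) = (i : Int) + 1 := by push_cast; ring
      rw [hcast]
      rw [inner_loop data K n i (by omega) K (le_refl K), partTbl_full]

-- ===== VERDICT (by name: the statement is the Claim_ definition above) =====
theorem solution_spec : Claim_equal_solution := by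
  intro t w data _ hpre
  obtain ⟨ht, hw, hlen⟩ := hpre
  unfold Spec_solution solution solution_alt
  set n := t.toNat with hn
  set K := (w + 1).toNat with hK
  have hn1 : 1 ≤ n := by omega
  have hK2 : 2 ≤ K := by omega
  have htn : t = (n : Int) := by omega
  have hwK : w + 1 = (K : Int) := by omega
  simp only [PySem.List.pyRange_one, Int.sub_zero, zero_add, htn, hwK, Int.toNat_natCast]
  have htm1 : ((n : Int) - 1).toNat = n - 1 := by omega
  rw [htm1, ← expTbl_zero data K n]
  rw [outer_loop data K n hK2 n hn1 (le_refl n)]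
  have hidx : ((n : Int) - 1) = ((n - 1 : Nat) : Int) := by omega
  rw [hidx, PySem.List.pyGet?_natCast]
  have hget : (expTbl data K n n)[n - 1]? = some (expRow data K (n - 1)) := by
    rw [List.getElem?_eq_getElem (by rw [expTbl_length]; omega)]
    rw [expTbl_getElem data K n n (n - 1) (by rw [expTbl_length]; omega),
      if_pos (by omega : n - 1 < n)]
  rw [hget]
  simp only [Option.getD_some]
  congr 1
  rw [List.map_map]
  unfold expRow
  rfl
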